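-- pv_equiv track=rewrite | github.com/gamez-code/hackerrank_problems | save_prisioners/save_prisioners.py | give_candy
-- ===== SOURCE A (Python) =====
-- def give_candy(n, candys, index):
--     if candys == 0:
--         return index
--     else:
--         if index == n:
--             index = 1
--         else:
--             index += 1
--         return give_candy(n, candys - 1, index)
-- ===== SOURCE B (Python) =====
-- def give_candy(n, candys, index):
--     # O(1): the walk wraps only if it actually lands on position n.
--     if index <= n and candys > n - index:
--         # n - index steps reach n, one more wraps to 1; the rest cycle in 1..n.
--         return (candys - (n - index) - 1) % n + 1
--     # the walk stops before reaching n: a plain advance.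
--     return index + candys
-- ===== Notes on version B (the rewrite author's own statement) =====
-- stated objective: faster
-- what changed: Replaced the candys-step recursive walk by an O(1) closed form: if the walk reaches position n it wraps to 1 and then cycles, so the answer is ((candys-(n-index)-1) mod n)+1, otherwise it is index+candys; Pre_ excludes candys < 0 (A recurses forever) and, for a non-positive circle size n <= 0 (outside the task's natural domain), the walks that actually reach position n, where B's modulus is undefined at n = 0 and sign-flipped for n < 0.
-- outside the precondition, e.g. on give_candy(0, 2, -1): A returns 1, B raises ZeroDivisionError; on give_candy(-3, 5, -3): A returns 5, B returns -1
import Mathlib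
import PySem

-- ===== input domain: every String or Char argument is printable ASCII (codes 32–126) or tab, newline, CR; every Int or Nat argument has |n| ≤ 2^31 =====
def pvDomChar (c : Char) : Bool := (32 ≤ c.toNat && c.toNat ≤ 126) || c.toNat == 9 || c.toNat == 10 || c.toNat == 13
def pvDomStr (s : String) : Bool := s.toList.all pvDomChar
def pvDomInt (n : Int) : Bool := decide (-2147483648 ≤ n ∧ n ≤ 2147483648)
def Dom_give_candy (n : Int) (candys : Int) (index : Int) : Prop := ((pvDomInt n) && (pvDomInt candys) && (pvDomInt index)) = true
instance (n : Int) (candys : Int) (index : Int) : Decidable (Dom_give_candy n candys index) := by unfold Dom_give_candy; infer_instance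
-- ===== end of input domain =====

-- B replaces A's candys-step recursive walk by an O(1) closed form: a wrap
-- happens only if the walk lands on n, after which positions cycle modulo n.


-- ===== PORT A =====
-- A recurses once per remaining candy; faithful as fuel recursion on candys.toNat
-- (for candys ≥ 0, which Pre_ demands — on candys < 0 the Python never returns).
def give_candyFuel (n : Int) (fuel : Nat) (index : Int) : Int :=
  match fuel with
  | 0 => index
  | f + 1 => give_candyFuel n f (if index = n then 1 else index + 1)

def give_candy (n : Int) (candys : Int) (index : Int) : Int :=
  give_candyFuel n candys.toNat index

-- ===== PORT B =====
def give_candy_alt (n : Int) (candys : Int) (index : Int) : Int :=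
  if index ≤ n ∧ candys > n - index then
    PySem.Int.mod (candys - (n - index) - 1) n + 1
  else
    index + candys

-- ===== PRECONDITION & SPEC =====
-- Pre_ excludes candys < 0, where A never returns (infinite recursion), and, for a
-- non-positive circle size n ≤ 0 (outside the task's natural domain), the walks that
-- actually reach position n — there B's modulus is undefined at n = 0
-- (ZeroDivisionError) and its sign convention differs for n < 0.
def Pre_give_candy (n : Int) (candys : Int) (index : Int) : Prop :=
  0 ≤ candys ∧ (1 ≤ n ∨ n < index ∨ candys ≤ n - index)
instance (n : Int) (candys : Int) (index : Int) : Decidable (Pre_give_candy n candys index) := by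
  unfold Pre_give_candy; infer_instance

def pvWitness_give_candy : Int × Int × Int := (3, 5, 2)

def Spec_give_candy (n : Int) (candys : Int) (index : Int) (out : Int) : Prop := out = give_candy_alt n candys index
instance (n : Int) (candys : Int) (index : Int) (out : Int) : Decidable (Spec_give_candy n candys index out) := by unfold Spec_give_candy; infer_instance

-- ===== CLAIM (what is proved, stated in full; the proofs are below) =====
def Claim_equal_give_candy : Prop := ∀ (n : Int) (candys : Int) (index : Int), Dom_give_candy n candys index → Pre_give_candy n candys index → Spec_give_candy n candys index (give_candy n candys index)

-- ===== LEMMAS AND PROOFS =====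

-- Loop invariant: f steps of A's walk from any index equal B's closed form.
theorem give_candyFuel_closed (n : Int) (hn : 1 ≤ n) (f : Nat) :
    ∀ index : Int, give_candyFuel n f index = give_candy_alt n (f : Int) index := by
  induction f with
  | zero =>
    intro index
    rw [give_candyFuel, give_candy_alt, if_neg (by omega)]
    omega
  | succ f ih =>
    intro index
    rw [give_candyFuel]
    by_cases h : index = n
    · rw [if_pos h, ih 1]
      unfold give_candy_alt
      rw [if_pos (show index ≤ n ∧ (((f + 1 : Nat)) : Int) > n - index by push_cast; omega)]
      by_cases hf : (f : Int) > n - 1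
      · rw [if_pos (show (1 : Int) ≤ n ∧ (f : Int) > n - 1 from ⟨hn, hf⟩),
            PySem.Int.mod_eq_emod_of_pos (by omega), PySem.Int.mod_eq_emod_of_pos (by omega),
            show (((f + 1 : Nat)) : Int) - (n - index) - 1 = (f : Int) - (n - 1) - 1 + n * 1 by
              rw [h]; push_cast; ring,
            Int.add_mul_emod_self_left]
      · rw [if_neg (show ¬((1 : Int) ≤ n ∧ (f : Int) > n - 1) by omega),
            PySem.Int.mod_eq_emod_of_pos (by omega),
            show (((f + 1 : Nat)) : Int) - (n - index) - 1 = (f : Int) by rw [h]; push_cast; ring,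
            Int.emod_eq_of_lt (by omega) (by omega)]
        omega
    · rw [if_neg h, ih (index + 1)]
      unfold give_candy_alt
      by_cases hc : index + 1 ≤ n ∧ (f : Int) > n - (index + 1)
      · rw [if_pos hc,
            if_pos (show index ≤ n ∧ (((f + 1 : Nat)) : Int) > n - index by push_cast; omega)]
        congr 2
        push_cast
        ring
      · rw [if_neg hc,
            if_neg (show ¬(index ≤ n ∧ (((f + 1 : Nat)) : Int) > n - index) by push_cast; omega)]
        push_cast
        ring

-- If the start is past n, the walk never lands on n: a plain advance.
theorem give_candyFuel_gt (n : Int) (f : Nat) :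
    ∀ index : Int, n < index → give_candyFuel n f index = index + (f : Int) := by
  induction f with
  | zero => intro index _; rw [give_candyFuel]; omega
  | succ f ih =>
    intro index h
    rw [give_candyFuel, if_neg (by omega), ih (index + 1) (by omega)]
    push_cast
    ring

-- If the walk stops at or before n, it never lands on n earlier: a plain advance.
theorem give_candyFuel_le (n : Int) (f : Nat) :
    ∀ index : Int, index + (f : Int) ≤ n → give_candyFuel n f index = index + (f : Int) := by
  induction f with
  | zero => intro index _; rw [give_candyFuel]; omega
  | succ f ih =>
    intro index h
    rw [give_candyFuel, if_neg (by push_cast at h ⊢; omega),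
        ih (index + 1) (by push_cast at h ⊢; omega)]
    push_cast
    ring

theorem give_candy_spec : Claim_equal_give_candy := by
  intro n candys index _ hpre
  obtain ⟨hc, hn⟩ := hpre
  unfold Spec_give_candy give_candy
  rcases hn with hn | hgt | hle
  · rw [give_candyFuel_closed n hn candys.toNat index]
    congr 2
    omega
  · rw [give_candyFuel_gt n candys.toNat index hgt]
    unfold give_candy_alt
    rw [if_neg (by omega)]
    omega
  · rw [give_candyFuel_le n candys.toNat index (by omega)]
    unfold give_candy_alt
    rw [if_neg (by omega)]
    omega
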